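-- pv_equiv track=rewrite | github.com/Str3am786/SSKG | src/RSEF/extraction/pdf_extraction_tika.py | extract_possible_title
-- ===== SOURCE A (Python) =====
-- def extract_possible_title(pdf_raw_data: str):
--     """
--     Given raw data, this function attempts to extract a possible title.
--     ASSUMPTION: The title is assumed to be the first non-line break character and ends with two line breaks \n\n
--     :param pdf_raw_data: String of raw PDF data
--     --
--     :return: Possible title (String), or None if not found
--     """
--     poss_title = ""
--     found_first_char = False
--     previous_was_newline = False
--     for i in pdf_raw_data:
--         if not found_first_char:
--             if i != '\n':
--                 found_first_char = True
--                 poss_title = poss_title + i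
--             else:
--                 continue
--         else:
--             if i == '\n' and previous_was_newline:
--                 return poss_title[:-1]
--             elif i == '\n':
--                 previous_was_newline = True
--                 poss_title = poss_title + " "
--             else:
--                 previous_was_newline = False
--                 poss_title = poss_title + i
--     return None
-- ===== SOURCE B (Python) =====
-- def extract_possible_title(pdf_raw_data: str):
--     stripped = pdf_raw_data.lstrip('\n')
--     idx = stripped.find('\n\n')
--     if idx == -1:
--         return None
--     return stripped[:idx].replace('\n', ' ')
-- ===== Notes on version B (the rewrite author's own statement) =====
-- stated objective: faster
-- what changed: Replaced A's per-character state machine (found_first_char/previous_was_newline flags with incremental string accumulation) by three library string operations: lstrip('\n') to drop leading newlines, find('\n\n') to locate the terminator, and a slice plus replace('\n',' ') to build the title.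
import Mathlib
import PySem

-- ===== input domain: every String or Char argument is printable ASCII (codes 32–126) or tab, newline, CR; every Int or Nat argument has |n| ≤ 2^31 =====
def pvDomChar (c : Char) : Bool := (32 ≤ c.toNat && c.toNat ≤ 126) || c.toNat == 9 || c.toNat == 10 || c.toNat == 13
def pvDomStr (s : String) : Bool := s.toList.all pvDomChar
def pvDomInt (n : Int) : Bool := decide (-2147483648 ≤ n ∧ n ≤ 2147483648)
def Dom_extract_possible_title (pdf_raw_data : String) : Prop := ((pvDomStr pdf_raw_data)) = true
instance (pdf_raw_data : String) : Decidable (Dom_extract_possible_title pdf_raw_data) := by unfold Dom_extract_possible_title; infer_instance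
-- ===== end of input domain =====

-- B replaces A's per-character state machine by library string operations (lstrip / find / slice+replace); measurably faster by constant factor (C-level scans vs per-char Python loop).

-- ===== PORT A =====
-- the for-loop with its three state variables, transliterated as structural recursion over the characters
def extract_possible_title_loop (l : List Char) (foundFirst prevNL : Bool) (acc : List Char) : Option (List Char) :=
  match l with
  | [] => none
  | i :: rest =>
    if !foundFirst then
      if i ≠ '\n' then extract_possible_title_loop rest true prevNL (acc ++ [i])
      else extract_possible_title_loop rest foundFirst prevNL acc
    else
      if i = '\n' ∧ prevNL then some (PySem.List.slice acc none (some (-1)))   -- poss_title[:-1]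
      else if i = '\n' then extract_possible_title_loop rest foundFirst true (acc ++ [' '])
      else extract_possible_title_loop rest foundFirst false (acc ++ [i])

def extract_possible_title (pdf_raw_data : String) : Option String :=
  (extract_possible_title_loop pdf_raw_data.toList false false []).map String.mk

-- ===== PORT B =====
def extract_possible_title_alt (pdf_raw_data : String) : Option String :=
  -- lstrip('\n') drops all leading '\n' characters: exactly dropWhile (· == '\n')
  let stripped : List Char := pdf_raw_data.toList.dropWhile (· == '\n')
  let idx : Int := PySem.Chars.find stripped ['\n', '\n']
  if idx = -1 then none
  else some (String.mk (PySem.Chars.replace (PySem.List.slice stripped none (some idx)) ['\n'] [' ']))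

-- ===== PRECONDITION & SPEC =====
def Spec_extract_possible_title (pdf_raw_data : String) (out : Option String) : Prop := out = extract_possible_title_alt pdf_raw_data
instance (pdf_raw_data : String) (out : Option String) : Decidable (Spec_extract_possible_title pdf_raw_data out) := by unfold Spec_extract_possible_title; infer_instance

-- ===== CLAIM (what is proved, stated in full; the proofs are below) =====
def Claim_equal_extract_possible_title : Prop := ∀ (pdf_raw_data : String), Dom_extract_possible_title pdf_raw_data → Spec_extract_possible_title pdf_raw_data (extract_possible_title pdf_raw_data)

-- ===== LEMMAS AND PROOFS =====

-- reference function: the title of a list that starts after the leading newlines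
def pvG : List Char → Option (List Char)
  | [] => none
  | c :: rest =>
      if c = '\n' ∧ rest.head? = some '\n' then some []
      else (pvG rest).map (fun t => (if c = '\n' then ' ' else c) :: t)

def pvSubst (c : Char) : Char := if c = '\n' then ' ' else c

theorem pvLoop_true (l : List Char) :
    (∀ acc, extract_possible_title_loop l true false acc = (pvG l).map (acc ++ ·)) ∧
    (∀ acc, extract_possible_title_loop l true true acc =
      if l.head? = some '\n' then some acc.dropLast else (pvG l).map (acc ++ ·)) := by
  induction l with
  | nil => simp [extract_possible_title_loop, pvG]
  | cons c rest ih =>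
    constructor
    · intro acc
      by_cases hc : c = '\n'
      · subst hc
        rw [extract_possible_title_loop]
        simp only [ih.2 (acc ++ [' '])]
        by_cases hr : rest.head? = some '\n'
        · simp [pvG, hr]
        · simp [pvG, hr, Option.map_map]
          cases pvG rest <;> simp [Function.comp]
      · rw [extract_possible_title_loop]
        simp only [hc, ih.1 (acc ++ [c])]
        simp [pvG, hc]
        cases pvG rest <;> simp [Function.comp]
    · intro acc
      by_cases hc : c = '\n'
      · subst hc
        rw [extract_possible_title_loop]
        simp [PySem.List.slice_to_neg_one]
      · rw [extract_possible_title_loop]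
        simp only [hc, ih.1 (acc ++ [c])]
        simp [pvG, hc]
        cases pvG rest <;> simp [Function.comp]

theorem pvLoop_skip (l : List Char) :
    extract_possible_title_loop l false false [] = pvG (l.dropWhile (· == '\n')) := by
  induction l with
  | nil => simp [extract_possible_title_loop, pvG]
  | cons c rest ih =>
    by_cases hc : c = '\n'
    · subst hc
      rw [extract_possible_title_loop]
      simpa using ih
    · rw [extract_possible_title_loop]
      simp only [hc, List.dropWhile_cons]
      have := (pvLoop_true rest).1 [c]
      simp [hc, this, pvG]

-- pvG returns none exactly when '\n\n' is not a substring, and otherwise the mapped prefix up to its first occurrence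
theorem pvG_none (l : List Char) (h : ¬ ['\n', '\n'] <:+: l) : pvG l = none := by
  induction l with
  | nil => simp [pvG]
  | cons c rest ih =>
    have h1 : ¬ ['\n', '\n'] <:+: rest := fun hx => h (hx.trans ⟨[c], [], by simp⟩)
    have h2 : ¬ (c = '\n' ∧ rest.head? = some '\n') := by
      rintro ⟨rfl, hh⟩
      cases rest with
      | nil => simp at hh
      | cons d r2 =>
        simp at hh
        subst hh
        exact h ⟨[], r2, by simp⟩
    simp [pvG, h2, ih h1]

theorem pvG_some (l : List Char) (k : Nat) (hk : ['\n', '\n'] <+: l.drop k)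
    (hmin : ∀ i < k, ¬ ['\n', '\n'] <+: l.drop i) :
    pvG l = some ((l.take k).map pvSubst) := by
  induction l generalizing k with
  | nil => simp at hk
  | cons c rest ih =>
    cases k with
    | zero =>
      simp only [List.drop_zero] at hk
      obtain ⟨t, ht⟩ := hk
      simp only [List.cons_append, List.nil_append] at ht
      injection ht with hc hrest
      subst hc
      cases rest with
      | nil => simp at hrest
      | cons d r2 =>
        injection hrest with hd _
        subst hd
        simp [pvG]
    | succ k' =>
      have h0 : ¬ (c = '\n' ∧ rest.head? = some '\n') := by
        rintro ⟨rfl, hh⟩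
        apply hmin 0 (by omega)
        cases rest with
        | nil => simp at hh
        | cons d r2 => simp at hh; subst hh; exact ⟨r2, by simp⟩
      have hk' : ['\n', '\n'] <+: rest.drop k' := by simpa using hk
      have hmin' : ∀ i < k', ¬ ['\n', '\n'] <+: rest.drop i := by
        intro i hi hp
        exact hmin (i + 1) (by omega) (by simpa using hp)
      simp [pvG, h0, ih k' hk' hmin', List.take_succ_cons, pvSubst]

-- replace '\n' ' ' on a list with single-char pattern is the pointwise substitution
theorem pvReplace_go (fuel : Nat) (l acc : List Char) (h : l.length ≤ fuel) :
    PySem.Chars.replace.go ['\n'] [' '] fuel l acc = acc.reverse ++ l.map pvSubst := by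
  induction fuel generalizing l acc with
  | zero =>
    have : l = [] := by cases l <;> simp_all
    subst this
    simp [PySem.Chars.replace.go]
  | succ f ih =>
    cases l with
    | nil => simp [PySem.Chars.replace.go]
    | cons c t =>
      rw [PySem.Chars.replace.go]
      by_cases hc : c = '\n'
      · subst hc
        rw [if_pos (by simp [List.isPrefixOf])]
        have ht := ih t (' ' :: acc) (by simp at h; omega)
        show PySem.Chars.replace.go ['\n'] [' '] f t (' ' :: acc) = acc.reverse ++ List.map pvSubst ('\n' :: t)
        rw [ht]
        simp [pvSubst]
      · rw [if_neg (by simp [List.isPrefixOf]; exact fun h' => hc h'.symm)]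
        rw [ih t _ (by simp at h; omega)]
        simp [pvSubst, hc]

theorem pvReplace_map (l : List Char) :
    PySem.Chars.replace l ['\n'] [' '] = l.map pvSubst := by
  rw [PySem.Chars.replace]
  rw [if_neg (by simp)]
  simpa using pvReplace_go l.length l [] le_rfl

theorem pvG_eq_alt (l : List Char) :
    pvG l = (if PySem.Chars.find l ['\n', '\n'] = -1 then none
             else some (((PySem.List.slice l none (some (PySem.Chars.find l ['\n', '\n'])))).map pvSubst)) := by
  by_cases h : PySem.Chars.find l ['\n', '\n'] = -1
  · rw [if_pos h, pvG_none]
    exact (PySem.Chars.find_eq_neg_one_iff _ _).1 h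
  · rw [if_neg h]
    have hpos : 0 ≤ PySem.Chars.find l ['\n', '\n'] := by
      rcases (PySem.Chars.neg_one_le_find l ['\n','\n']).lt_or_eq with hlt | he
      · omega
      · exact absurd he.symm h
    obtain ⟨hpre, hmin⟩ := PySem.Chars.find_spec (s := l) (sub := ['\n','\n']) hpos
    have hcast : PySem.Chars.find l ['\n', '\n'] = ((PySem.Chars.find l ['\n', '\n']).toNat : Int) := by omega
    rw [hcast, PySem.List.slice_to_natCast]
    exact pvG_some l _ hpre hmin

-- ===== VERDICT (by name: the statement is the Claim_ definition above) =====
theorem extract_possible_title_spec : Claim_equal_extract_possible_title := by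
  unfold Claim_equal_extract_possible_title
  intro pdf_raw_data _
  unfold Spec_extract_possible_title extract_possible_title extract_possible_title_alt
  rw [pvLoop_skip, pvG_eq_alt]
  by_cases hf : PySem.Chars.find (pdf_raw_data.toList.dropWhile (· == '\n')) ['\n', '\n'] = -1
  · simp only [hf, if_pos]
    simp
  · simp only [hf, if_neg]
    simp [pvReplace_map]
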